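-- pv_equiv track=rewrite | github.com/Arsen1302/Code-copy-detector | TestData/solutions/problem_961_3.py | solution_961_3
-- ===== SOURCE A (Python) =====
-- from typing import List
--
-- def solution_961_3(nums: List[int], k: int) -> bool:
--
--     if k == 0:
--         # Quick acception when k = 0
--         return True
--
--
--
--     # record previous index of 1
--     prev_position = None
--
--     for idx, number in enumerate(nums):
--
--         if number == 1:
--
--             if ( prev_position is not None ) and (idx - prev_position) <= k:
--                 # Reject when distance to previous 1 is too close
--                 return False
--
--             prev_position = idx
--
--     # Accept if all 1s are separated of distance k
--     return True
-- ===== SOURCE B (Python) =====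
-- def solution_961_3(nums, k):
--     w = max(k, 0)
--     return all(1 not in nums[i + 1 : i + 1 + w]
--                for i, x in enumerate(nums) if x == 1)
-- ===== Notes on version B (the rewrite author's own statement) =====
-- stated objective: alternative
-- what changed: Replaces A's prev-index gap-tracking scan with early return (plus a k==0 shortcut) by a window-membership formulation: for every index holding a 1, test that no 1 occurs in the slice of the next max(k,0) elements; correct because two 1s are <=k apart iff some 1 has another 1 inside its following k-window.
import Mathlib
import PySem

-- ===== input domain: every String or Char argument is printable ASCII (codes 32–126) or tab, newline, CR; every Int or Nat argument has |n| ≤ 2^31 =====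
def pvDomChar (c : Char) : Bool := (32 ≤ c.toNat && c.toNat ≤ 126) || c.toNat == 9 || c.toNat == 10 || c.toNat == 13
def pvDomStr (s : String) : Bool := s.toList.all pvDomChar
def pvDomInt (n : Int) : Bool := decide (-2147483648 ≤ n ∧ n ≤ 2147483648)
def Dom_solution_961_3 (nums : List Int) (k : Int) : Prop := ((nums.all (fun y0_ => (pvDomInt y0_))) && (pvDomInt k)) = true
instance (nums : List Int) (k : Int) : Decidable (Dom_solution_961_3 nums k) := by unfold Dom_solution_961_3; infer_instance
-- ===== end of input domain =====

-- B recasts the check as per-1 window membership: for every 1 at index i, no 1 may occur in the next max(k,0) elements (alternative decomposition, no prev tracking, no k==0 shortcut).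


-- ===== PORT A =====
-- the for-loop over enumerate(nums) with early return, carrying prev_position
def pvLoopA : List (Int × Int) → Option Int → Int → Bool
  | [], _, _ => true
  | (idx, number) :: rest, prev, k =>
    if number == 1 then
      match prev with
      | some p => if idx - p ≤ k then false else pvLoopA rest (some idx) k
      | none => pvLoopA rest (some idx) k
    else pvLoopA rest prev k

def solution_961_3 (nums : List Int) (k : Int) : Bool :=
  if k == 0 then true
  else pvLoopA (PySem.List.enumerate nums) none k

-- ===== PORT B =====
-- all(1 not in nums[i+1:i+1+w] for i, x in enumerate(nums) if x == 1), w = max(k, 0)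
def solution_961_3_alt (nums : List Int) (k : Int) : Bool :=
  let w := max k 0
  ((PySem.List.enumerate nums).filter (fun p => p.2 == 1)).all
    (fun p => !((PySem.List.slice nums (some (p.1 + 1)) (some (p.1 + 1 + w))).contains 1))

-- ===== PRECONDITION & SPEC =====
def Spec_solution_961_3 (nums : List Int) (k : Int) (out : Bool) : Prop := out = solution_961_3_alt nums k
instance (nums : List Int) (k : Int) (out : Bool) : Decidable (Spec_solution_961_3 nums k out) := by unfold Spec_solution_961_3; infer_instance

-- ===== CLAIM (what is proved, stated in full; the proofs are below) =====
def Claim_equal_solution_961_3 : Prop := ∀ (nums : List Int) (k : Int), Dom_solution_961_3 nums k → Spec_solution_961_3 nums k (solution_961_3 nums k)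

-- ===== LEMMAS AND PROOFS =====

-- the list of 1-positions
def pvPos (nums : List Int) : List Int :=
  ((PySem.List.enumerate nums).filter (fun p => p.2 == 1)).map (fun p => p.1)

theorem pvMem_pos (nums : List Int) (q : Int) :
    q ∈ pvPos nums ↔ ∃ (j : Nat) (h : j < nums.length), q = (j : Int) ∧ nums[j] = 1 := by
  simp only [pvPos, List.mem_map, List.mem_filter, PySem.List.mem_enumerate_iff]
  constructor
  · rintro ⟨⟨i, v⟩, ⟨⟨j, hj, hp⟩, hv⟩, rfl⟩
    cases hp
    exact ⟨j, hj, by simp, by simpa using hv⟩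
  · rintro ⟨j, hj, rfl, h1⟩
    exact ⟨((j : Int), nums[j]), ⟨⟨j, hj, by simp⟩, by simpa using h1⟩, rfl⟩

theorem pvPos_pairwise (nums : List Int) : (pvPos nums).Pairwise (· < ·) := by
  have h := PySem.List.pairwise_lt_enumerate (xs := nums) (s := 0)
  exact List.Pairwise.map _ (fun a b h => h) (List.Pairwise.filter _ h)

-- A's loop only looks at the indices of the 1-entries
theorem pvLoopA_filter (l : List (Int × Int)) (prev : Option Int) (k : Int) :
    pvLoopA l prev k =
      pvLoopA (((l.filter (fun p => p.2 == 1)).map (fun p => (p.1, (1:Int))))) prev k := by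
  induction l generalizing prev with
  | nil => rfl
  | cons h t ih =>
    obtain ⟨idx, number⟩ := h
    by_cases hn : number = 1
    · subst hn
      simp only [List.filter_cons, List.map_cons, beq_self_eq_true, if_pos]
      cases prev with
      | none => simp [pvLoopA, ih]
      | some p =>
        by_cases hk : idx - p ≤ k
        · simp [pvLoopA, hk]
        · simp [pvLoopA, hk, ih]
    · have hb : (number == 1) = false := by simp [hn]
      simp only [List.filter_cons, hb, if_neg, Bool.false_eq_true, not_false_iff]
      simpa [pvLoopA, hb] using ih prev

-- A's loop on a list of 1-entries equals the consecutive-pair check, seeded by prev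
theorem pvLoopA_pairs (xs : List Int) (k : Int) :
    ∀ p, pvLoopA (xs.map (fun i => (i, (1:Int)))) (some p) k =
      ((p :: xs).zip xs).all (fun q => decide (q.2 - q.1 > k)) := by
  induction xs with
  | nil => intro p; rfl
  | cons x t ih =>
    intro p
    by_cases hk : x - p ≤ k
    · simp [pvLoopA, hk]
    · simp [pvLoopA, hk, ih x]
      omega

theorem pvLoopA_none (xs : List Int) (k : Int) :
    pvLoopA (xs.map (fun i => (i, (1:Int)))) none k =
      (xs.zip xs.tail).all (fun q => decide (q.2 - q.1 > k)) := by
  cases xs with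
  | nil => rfl
  | cons x t => simpa [pvLoopA] using pvLoopA_pairs t k x

-- filter-then-map rearrangement: the 1-entries of enumerate are (index, 1)
theorem pvFilter_ones (l : List (Int × Int)) :
    (l.filter (fun p => p.2 == 1)).map (fun p => (p.1, (1:Int))) =
      ((l.filter (fun p => p.2 == 1)).map (fun p => p.1)).map (fun i => (i, (1:Int))) := by
  induction l with
  | nil => rfl
  | cons h t ih =>
    by_cases hn : h.2 = 1
    · simp [hn, ih]
    · simp [hn, ih]

-- so A (for k != 0) is the consecutive-gap check over pvPos
theorem pvA_eq_zip (nums : List Int) (k : Int) :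
    pvLoopA (PySem.List.enumerate nums) none k =
      ((pvPos nums).zip (pvPos nums).tail).all (fun q => decide (q.2 - q.1 > k)) := by
  rw [pvLoopA_filter, pvFilter_ones, pvLoopA_none]; rfl

-- consecutive-gap check on a strictly increasing list is the all-pairs check
theorem pvZip_iff_pairwise (xs : List Int) (k : Int) (hs : xs.Pairwise (· < ·)) :
    (xs.zip xs.tail).all (fun q => decide (q.2 - q.1 > k)) = true ↔
      xs.Pairwise (fun a b => b - a > k) := by
  induction xs with
  | nil => simp
  | cons x t ih =>
    cases t with
    | nil => simp
    | cons y u =>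
      obtain ⟨hx, ht⟩ := List.pairwise_cons.mp hs
      have hy := List.pairwise_cons.mp ht
      simp only [List.tail_cons, List.zip_cons_cons, List.all_cons, Bool.and_eq_true,
        decide_eq_true_eq]
      have ih' := ih ht
      simp only [List.tail_cons] at ih'
      rw [ih']
      constructor
      · rintro ⟨hxy, hrest⟩
        refine List.pairwise_cons.mpr ⟨?_, hrest⟩
        intro z hz
        rcases List.mem_cons.mp hz with rfl | hz
        · exact hxy
        · have hyz : y < z := hy.1 z hz
          omega
      · intro h
        obtain ⟨hall, hrest⟩ := List.pairwise_cons.mp h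
        exact ⟨hall y (by simp), hrest⟩

-- on a strictly increasing list, Pairwise of the gap relation is the unordered all-pairs fact
theorem pvPairwise_iff_forall (xs : List Int) (k : Int) (hs : xs.Pairwise (· < ·)) :
    xs.Pairwise (fun a b => b - a > k) ↔
      ∀ a ∈ xs, ∀ b ∈ xs, a < b → b - a > k := by
  rw [List.pairwise_iff_getElem] at hs ⊢
  constructor
  · intro h a ha b hb hab
    obtain ⟨i, hi, rfl⟩ := List.mem_iff_getElem.mp ha
    obtain ⟨j, hj, rfl⟩ := List.mem_iff_getElem.mp hb
    rcases lt_trichotomy i j with hij | rfl | hij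
    · exact h i j hi hj hij
    · omega
    · have := hs j i hj hi hij; omega
  · intro h i j hi hj hij
    exact h _ (List.getElem_mem hi) _ (List.getElem_mem hj) (hs i j hi hj hij)

-- B's window test: 1 occurs in nums[j+1 : j+1+n] iff some 1-position lies in (j, j+n]
theorem pvWindow (nums : List Int) (j n : Nat) :
    ((PySem.List.slice nums (some ((j:Int) + 1)) (some ((j:Int) + 1 + (n:Int)))).contains 1) = true ↔
      ∃ q ∈ pvPos nums, (j:Int) < q ∧ q ≤ (j:Int) + (n:Int) := by
  have hcast : ((j:Int) + 1) = ((j+1 : Nat) : Int) := by push_cast; ring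
  rw [hcast, PySem.List.slice_natCast_add]
  constructor
  · intro hc
    have hmem1 : (1:Int) ∈ (nums.drop (j+1)).take n := by simpa using hc
    obtain ⟨i, hi, hv⟩ := List.mem_iff_getElem.mp hmem1
    have hlen : i < n ∧ j + 1 + i < nums.length := by
      have := hi
      simp only [List.length_take, List.length_drop] at this
      omega
    refine ⟨((j + 1 + i : Nat) : Int), ?_, by push_cast; omega, by push_cast; omega⟩
    refine (pvMem_pos nums _).mpr ⟨j + 1 + i, hlen.2, rfl, ?_⟩
    rw [List.getElem_take, List.getElem_drop] at hv
    exact hv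
  · rintro ⟨q, hq, hlt, hle⟩
    obtain ⟨m, hm, rfl, h1⟩ := (pvMem_pos nums q).mp hq
    have hjm : j < m ∧ m ≤ j + n := by omega
    have hi : m - (j+1) < ((nums.drop (j+1)).take n).length := by
      simp only [List.length_take, List.length_drop]
      omega
    have hv : ((nums.drop (j+1)).take n)[m - (j+1)]'hi = 1 := by
      rw [List.getElem_take, List.getElem_drop]
      have heq : j + 1 + (m - (j+1)) = m := by omega
      simp only [heq]
      exact h1
    have : (1:Int) ∈ (nums.drop (j+1)).take n := List.mem_iff_getElem.mpr ⟨_, hi, hv⟩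
    simpa using this

-- B equals the all-pairs gap check over pvPos (w = max k 0; gaps are >= 1, so > w iff > k)
theorem pvB_iff (nums : List Int) (k : Int) :
    solution_961_3_alt nums k = true ↔
      ∀ a ∈ pvPos nums, ∀ b ∈ pvPos nums, a < b → b - a > k := by
  obtain ⟨n, hn⟩ : ∃ n : Nat, max k 0 = (n:Int) := ⟨(max k 0).toNat, by omega⟩
  simp only [solution_961_3_alt, List.all_eq_true, Bool.not_eq_true']
  constructor
  · intro h a ha b hb hab
    obtain ⟨j, hj, rfl, h1⟩ := (pvMem_pos nums a).mp ha
    by_contra hgap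
    have hmem : ((j:Int), nums[j]) ∈ (PySem.List.enumerate nums).filter (fun p => p.2 == 1) := by
      simp only [List.mem_filter, PySem.List.mem_enumerate_iff]
      exact ⟨⟨j, hj, by simp⟩, by simpa using h1⟩
    have hc := h _ hmem
    dsimp only at hc
    have hwin : ((PySem.List.slice nums (some ((j:Int) + 1)) (some ((j:Int) + 1 + (n:Int)))).contains 1) = true := by
      rw [pvWindow]
      exact ⟨b, hb, hab, by omega⟩
    rw [← hn] at hwin
    rw [hc] at hwin
    exact absurd hwin (by simp)
  · intro h p hp
    simp only [List.mem_filter, PySem.List.mem_enumerate_iff] at hp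
    obtain ⟨⟨j, hj, rfl⟩, hv⟩ := hp
    dsimp only
    rw [show ((0:Int) + (j:Int) + 1 + max k 0) = ((j:Int) + 1 + (n:Int)) by omega]
    rw [show ((0:Int) + (j:Int) + 1) = ((j:Int) + 1) by omega]
    rw [Bool.eq_false_iff]
    intro hcon
    rw [pvWindow] at hcon
    obtain ⟨q, hq, hlt, hle⟩ := hcon
    have hja : (j:Int) ∈ pvPos nums := by
      refine (pvMem_pos nums _).mpr ⟨j, hj, rfl, by simpa using hv⟩
    have := h _ hja _ hq hlt
    omega

-- any strictly increasing list trivially passes the gap check for k <= 0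
theorem pvZip_of_nonpos (xs : List Int) (hp : xs.Pairwise (· < ·)) (k : Int)
    (hk : k ≤ 0) : (xs.zip xs.tail).all (fun q => decide (q.2 - q.1 > k)) = true := by
  rw [pvZip_iff_pairwise xs k hp]
  exact hp.imp (by intro a b h; omega)


-- ===== VERDICT (by name: the statement is the Claim_ definition above) =====
theorem solution_961_3_spec : Claim_equal_solution_961_3 := by
  intro nums k _
  unfold Spec_solution_961_3
  have hB := pvB_iff nums k
  have hpw := pvPos_pairwise nums
  by_cases hk : k ≤ 0
  · have hBtrue : solution_961_3_alt nums k = true := by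
      rw [hB]
      intro a _ b _ hab
      omega
    rw [hBtrue]
    unfold solution_961_3
    by_cases h0 : k = 0
    · simp [h0]
    · have : (k == 0) = false := by simp [h0]
      rw [this, if_neg (by simp), pvA_eq_zip]
      exact pvZip_of_nonpos _ hpw k hk
  · have h0 : (k == 0) = false := by simp; omega
    unfold solution_961_3
    rw [h0, if_neg (by simp), pvA_eq_zip]
    have hiff := (pvZip_iff_pairwise (pvPos nums) k hpw).trans
      ((pvPairwise_iff_forall (pvPos nums) k hpw).trans hB.symm)
    cases hA : ((pvPos nums).zip (pvPos nums).tail).all (fun q => decide (q.2 - q.1 > k))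
    · cases hBv : solution_961_3_alt nums k
      · rfl
      · exact absurd (hiff.mpr hBv) (by simp [hA])
    · exact (hiff.mp hA).symm
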